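-- pv_equiv track=rewrite | github.com/namanag97/venomqa | src/venomqa/v1/adapters/resource_graph.py | _parse_path_segments
-- ===== SOURCE A (Python) =====
-- def _parse_path_segments(path: str) -> list[tuple[str, str | None]]:
--     """Parse URL path into (resource_name, param_name) pairs.
--
--     Example:
--         "/workspaces/{workspace_id}/uploads/{upload_id}"
--         -> [("workspaces", "workspace_id"), ("uploads", "upload_id")]
--     """
--     segments = []
--     parts = [p for p in path.split("/") if p]
--
--     i = 0
--     while i < len(parts):
--         part = parts[i]
--         if part.startswith("{"):
--             # This is a parameter, skip (already captured)
--             i += 1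
--             continue
--
--         # Resource name
--         param_name = None
--         if i + 1 < len(parts) and parts[i + 1].startswith("{"):
--             param_name = parts[i + 1].strip("{}")
--             i += 2
--         else:
--             i += 1
--
--         segments.append((part, param_name))
--
--     return segments
-- ===== SOURCE B (Python) =====
-- def _parse_path_segments(path: str) -> list[tuple[str, str | None]]:
--     """Single forward pass carrying the resource awaiting its parameter."""
--     segments = []
--     pending = None
--     for part in path.split("/"):
--         if not part:
--             continue
--         if part.startswith("{"):
--             if pending is not None:
--                 segments.append((pending, part.strip("{}")))
--                 pending = None
--         else:
--             if pending is not None: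
--                 segments.append((pending, None))
--             pending = part
--     if pending is not None:
--         segments.append((pending, None))
--     return segments
-- ===== Notes on version B (the rewrite author's own statement) =====
-- stated objective: alternative
-- what changed: Replaced the index-based while loop that peeks at parts[i+1] (advancing by 1 or 2) with a single forward pass that carries the resource awaiting its parameter as state, flushing it when a plain segment or the end of the list follows.
import Mathlib
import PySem

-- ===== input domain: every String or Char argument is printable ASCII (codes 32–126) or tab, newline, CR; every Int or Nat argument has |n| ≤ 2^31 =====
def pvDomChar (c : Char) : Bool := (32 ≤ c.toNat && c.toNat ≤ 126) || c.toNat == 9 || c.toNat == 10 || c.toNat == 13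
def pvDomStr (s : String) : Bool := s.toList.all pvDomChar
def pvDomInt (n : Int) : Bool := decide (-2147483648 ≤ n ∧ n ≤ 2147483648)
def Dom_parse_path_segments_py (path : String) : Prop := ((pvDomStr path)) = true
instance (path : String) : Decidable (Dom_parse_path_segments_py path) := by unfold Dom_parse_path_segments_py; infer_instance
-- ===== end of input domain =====

-- B replaces A's index loop with lookahead (i advances by 1 or 2) by a state-carrying single
-- pass that carries the resource awaiting its parameter (alternative decomposition; same cost).

-- ===== PORT A =====
-- A's while loop over index i, peeking at parts[i+1]: recursion on the remaining suffix of parts.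
def pvLoopA : List String → List (String × Option String)
  | [] => []
  | p :: rest =>
    if PySem.Str.startswith p "{" then
      pvLoopA rest
    else
      match rest with
      | q :: rest' =>
        if PySem.Str.startswith q "{" then
          (p, some (PySem.Str.stripChars q "{}")) :: pvLoopA rest'
        else
          (p, none) :: pvLoopA (q :: rest')
      | [] => (p, none) :: pvLoopA []

def parse_path_segments_py (path : String) : List (String × Option String) :=
  pvLoopA (((PySem.Str.split? path "/").getD []).filter (fun p => p != ""))

-- ===== PORT B =====
-- B's for loop over path.split("/"), carrying the resource that awaits its parameter:
-- empty parts are skipped inline, and a leftover carried resource is flushed when the list ends.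
def pvLoopB (pending : Option String) : List String → List (String × Option String)
  | [] =>
    match pending with
    | some r => [(r, none)]
    | none => []
  | p :: rest =>
    if p == "" then
      pvLoopB pending rest
    else if PySem.Str.startswith p "{" then
      match pending with
      | some r => (r, some (PySem.Str.stripChars p "{}")) :: pvLoopB none rest
      | none => pvLoopB none rest
    else
      match pending with
      | some r => (r, none) :: pvLoopB (some p) rest
      | none => pvLoopB (some p) rest

def parse_path_segments_py_alt (path : String) : List (String × Option String) :=
  pvLoopB none ((PySem.Str.split? path "/").getD [])

-- ===== PRECONDITION & SPEC =====
def Spec_parse_path_segments_py (path : String) (out : List (String × Option String)) : Prop := out = parse_path_segments_py_alt path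
instance (path : String) (out : List (String × Option String)) : Decidable (Spec_parse_path_segments_py path out) := by unfold Spec_parse_path_segments_py; infer_instance

-- ===== CLAIM (what is proved, stated in full; the proofs are below) =====
def Claim_equal_parse_path_segments_py : Prop := ∀ (path : String), Dom_parse_path_segments_py path → Spec_parse_path_segments_py path (parse_path_segments_py path)

-- ===== LEMMAS AND PROOFS =====

-- unfolding lemmas for A's loop
theorem pvLoopA_nil : pvLoopA [] = [] := rfl

theorem pvLoopA_brace (q : String) (rest : List String)
    (hq : PySem.Str.startswith q "{" = true) :
    pvLoopA (q :: rest) = pvLoopA rest := by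
  rw [pvLoopA.eq_def]; dsimp only; rw [hq]; simp only [if_true]

theorem pvLoopA_res_nil (p : String) (hp : PySem.Str.startswith p "{" = false) :
    pvLoopA [p] = [(p, none)] := by
  rw [pvLoopA.eq_def]; dsimp only; rw [hp]
  simp [pvLoopA_nil]

theorem pvLoopA_res_brace (p q : String) (rest : List String)
    (hp : PySem.Str.startswith p "{" = false) (hq : PySem.Str.startswith q "{" = true) :
    pvLoopA (p :: q :: rest) = (p, some (PySem.Str.stripChars q "{}")) :: pvLoopA rest := by
  rw [pvLoopA.eq_def]; dsimp only; rw [hp, hq]; simp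

theorem pvLoopA_res_res (p q : String) (rest : List String)
    (hp : PySem.Str.startswith p "{" = false) (hq : PySem.Str.startswith q "{" = false) :
    pvLoopA (p :: q :: rest) = (p, none) :: pvLoopA (q :: rest) := by
  rw [pvLoopA.eq_def]; dsimp only; rw [hp, hq]; simp

-- unfolding lemmas for B's loop
theorem pvLoopB_nil_some (r : String) : pvLoopB (some r) [] = [(r, none)] := rfl

theorem pvLoopB_empty (pending : Option String) (rest : List String) :
    pvLoopB pending ("" :: rest) = pvLoopB pending rest := by
  rw [pvLoopB.eq_def]; dsimp only; simp

theorem pvLoopB_brace_none (p : String) (rest : List String)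
    (hpe : (p == "") = false) (hp : PySem.Str.startswith p "{" = true) :
    pvLoopB none (p :: rest) = pvLoopB none rest := by
  rw [pvLoopB.eq_def]; dsimp only; rw [hpe, hp]; simp

theorem pvLoopB_brace_some (r p : String) (rest : List String)
    (hpe : (p == "") = false) (hp : PySem.Str.startswith p "{" = true) :
    pvLoopB (some r) (p :: rest) = (r, some (PySem.Str.stripChars p "{}")) :: pvLoopB none rest := by
  rw [pvLoopB.eq_def]; dsimp only; rw [hpe, hp]; simp

theorem pvLoopB_res_none (p : String) (rest : List String)
    (hpe : (p == "") = false) (hp : PySem.Str.startswith p "{" = false) :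
    pvLoopB none (p :: rest) = pvLoopB (some p) rest := by
  rw [pvLoopB.eq_def]; dsimp only; rw [hpe, hp]; simp

theorem pvLoopB_res_some (r p : String) (rest : List String)
    (hpe : (p == "") = false) (hp : PySem.Str.startswith p "{" = false) :
    pvLoopB (some r) (p :: rest) = (r, none) :: pvLoopB (some p) rest := by
  rw [pvLoopB.eq_def]; dsimp only; rw [hpe, hp]; simp

-- B skips empty parts inline; filtering them out up front gives the same run.
theorem pvLoopB_filter (pending : Option String) (l : List String) :
    pvLoopB pending l = pvLoopB pending (l.filter (fun p => p != "")) := by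
  induction l generalizing pending with
  | nil => rfl
  | cons p rest ih =>
    by_cases hp : p = ""
    · subst hp
      rw [List.filter_cons_of_neg (by simp), pvLoopB_empty]
      exact ih pending
    · have hpb : (p == "") = false := by simpa using hp
      rw [List.filter_cons_of_pos (by simp [bne, hpb])]
      by_cases h1 : PySem.Str.startswith p "{" = true
      · cases pending with
        | none => rw [pvLoopB_brace_none p _ hpb h1, pvLoopB_brace_none p _ hpb h1, ih]
        | some r => rw [pvLoopB_brace_some r p _ hpb h1, pvLoopB_brace_some r p _ hpb h1, ih]
      · have h1' : PySem.Str.startswith p "{" = false := by simpa using h1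
        cases pending with
        | none => rw [pvLoopB_res_none p _ hpb h1', pvLoopB_res_none p _ hpb h1', ih]
        | some r => rw [pvLoopB_res_some r p _ hpb h1', pvLoopB_res_some r p _ hpb h1', ih]

-- joint invariant on empty-free lists: B's state-carrying pass agrees with A's lookahead loop
theorem pvLoop_eq (l : List String) (hl : ∀ p ∈ l, (p == "") = false) :
    pvLoopB none l = pvLoopA l ∧
      ∀ r, PySem.Str.startswith r "{" = false → pvLoopB (some r) l = pvLoopA (r :: l) := by
  induction l with
  | nil =>
    refine ⟨rfl, fun r hr => ?_⟩
    rw [pvLoopB_nil_some, pvLoopA_res_nil r hr]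
  | cons q rest ih =>
    have hqe : (q == "") = false := hl q (by simp)
    have ih' := ih (fun p hp => hl p (by simp [hp]))
    by_cases hq : PySem.Str.startswith q "{" = true
    · refine ⟨?_, fun r hr => ?_⟩
      · rw [pvLoopB_brace_none q rest hqe hq, pvLoopA_brace q rest hq]
        exact ih'.1
      · rw [pvLoopB_brace_some r q rest hqe hq, pvLoopA_res_brace r q rest hr hq]
        exact congrArg _ ih'.1
    · have hq' : PySem.Str.startswith q "{" = false := by simpa using hq
      refine ⟨?_, fun r hr => ?_⟩
      · rw [pvLoopB_res_none q rest hqe hq']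
        exact ih'.2 q hq'
      · rw [pvLoopB_res_some r q rest hqe hq', pvLoopA_res_res r q rest hr hq']
        exact congrArg _ (ih'.2 q hq')

-- ===== VERDICT (by name: the statement is the Claim_ definition above) =====
theorem parse_path_segments_py_spec : Claim_equal_parse_path_segments_py := by
  intro path _
  unfold Spec_parse_path_segments_py parse_path_segments_py parse_path_segments_py_alt
  rw [pvLoopB_filter]
  exact ((pvLoop_eq _ (fun p hp => by
    simp only [List.mem_filter, bne] at hp
    simpa using hp.2)).1).symm
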